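-- pv_equiv track=rewrite | github.com/deshakil/Weezy-AI-Agent | Weez-AI-Agent/handle_summarize.py | _is_contextual_request
-- ===== SOURCE A (Python) =====
-- from typing import Dict, List, Any, Optional
--
-- def _is_contextual_request(keywords: List[str]) -> bool:
--     """Check if the request contains contextual references."""
--     if not keywords:
--         return False
--
--     contextual_terms = [
--         "this", "that", "above", "previous", "last", "recent",
--         "earlier", "before", "mentioned", "discussed", "shown"
--     ]
--
--     keyword_text = " ".join(keywords).lower()
--     return any(term in keyword_text for term in contextual_terms)
-- ===== SOURCE B (Python) =====
-- def _is_contextual_request(keywords):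
--     """Check if the request contains contextual references."""
--     if not keywords:
--         return False
--
--     contextual_terms = (
--         "this", "that", "above", "previous", "last", "recent",
--         "earlier", "before", "mentioned", "discussed", "shown"
--     )
--
--     keyword_text = " ".join(keywords).lower()
--     # single left-to-right pass: at each position test whether any term starts there
--     for i in range(len(keyword_text)):
--         if keyword_text.startswith(contextual_terms, i):
--             return True
--     return False
-- ===== Notes on version B (the rewrite author's own statement) =====
-- stated objective: alternative
-- what changed: Replaces the 11 independent substring scans (any(term in text)) by a single left-to-right pass over the joined lowered text that at each position tests whether any contextual term starts there (str.startswith with a tuple).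
import Mathlib
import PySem

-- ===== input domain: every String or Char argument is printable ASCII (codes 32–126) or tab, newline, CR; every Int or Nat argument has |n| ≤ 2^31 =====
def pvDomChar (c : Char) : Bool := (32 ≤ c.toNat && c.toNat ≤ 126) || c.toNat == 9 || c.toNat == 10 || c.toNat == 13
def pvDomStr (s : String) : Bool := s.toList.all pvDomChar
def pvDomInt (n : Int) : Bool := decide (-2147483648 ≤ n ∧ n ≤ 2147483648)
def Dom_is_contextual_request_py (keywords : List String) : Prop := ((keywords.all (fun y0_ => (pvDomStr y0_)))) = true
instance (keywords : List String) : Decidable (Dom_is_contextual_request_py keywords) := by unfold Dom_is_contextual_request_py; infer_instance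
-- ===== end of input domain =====

-- ===== PORT A =====
-- A re-implementation check: B does one scan of the text testing term-prefixes at each position
-- instead of A's eleven independent 'term in text' substring scans; same return value everywhere.
def ctxTerms : List String :=
  ["this", "that", "above", "previous", "last", "recent",
   "earlier", "before", "mentioned", "discussed", "shown"]

def is_contextual_request_py (keywords : List String) : Bool :=
  if keywords.isEmpty then false
  else
    let keyword_text := PySem.Str.lower (PySem.Str.join " " keywords)
    ctxTerms.any (fun term => PySem.Str.isIn term keyword_text)

-- ===== PORT B =====
def ctxTermsB : List (List Char) :=
  ["this".toList, "that".toList, "above".toList, "previous".toList, "last".toList,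
   "recent".toList, "earlier".toList, "before".toList, "mentioned".toList,
   "discussed".toList, "shown".toList]

-- the single pass: at each suffix, does some term start here?
def ctxScan : List Char → Bool
  | [] => false
  | c :: rest =>
    if ctxTermsB.any (fun t => t.isPrefixOf (c :: rest)) then true else ctxScan rest

def is_contextual_request_py_alt (keywords : List String) : Bool :=
  if keywords.isEmpty then false
  else ctxScan (PySem.Str.lower (PySem.Str.join " " keywords)).toList

-- ===== PRECONDITION & SPEC =====
def Spec_is_contextual_request_py (keywords : List String) (out : Bool) : Prop := out = is_contextual_request_py_alt keywords
instance (keywords : List String) (out : Bool) : Decidable (Spec_is_contextual_request_py keywords out) := by unfold Spec_is_contextual_request_py; infer_instance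

-- ===== CLAIM (what is proved, stated in full; the proofs are below) =====
def Claim_equal_is_contextual_request_py : Prop := ∀ (keywords : List String), Dom_is_contextual_request_py keywords → Spec_is_contextual_request_py keywords (is_contextual_request_py keywords)

-- ===== LEMMAS AND PROOFS =====
lemma ctxScan_iff (cs : List Char) :
    ctxScan cs = true ↔ ∃ t ∈ ctxTermsB, t <:+: cs := by
  induction cs with
  | nil =>
    simp only [ctxScan, List.infix_nil]
    constructor
    · intro h; cases h
    · rintro ⟨t, ht, rfl⟩; revert ht; decide
  | cons c rest ih =>
    simp only [ctxScan]
    split_ifs with h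
    · simp only [true_iff]
      rcases (List.any_eq_true).1 h with ⟨t, ht, hp⟩
      exact ⟨t, ht, (List.IsPrefix.isInfix (List.isPrefixOf_iff_prefix.1 hp))⟩
    · rw [ih]
      constructor
      · rintro ⟨t, ht, hinf⟩; exact ⟨t, ht, List.infix_cons hinf⟩
      · rintro ⟨t, ht, hinf⟩
        rcases List.infix_cons_iff.1 hinf with hpre | hinf'
        · exact absurd (List.any_eq_true.mpr
            ⟨t, ht, show (fun u => u.isPrefixOf (c :: rest)) t = true from
              List.isPrefixOf_iff_prefix.mpr hpre⟩) h
        · exact ⟨t, ht, hinf'⟩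

lemma ctxAny_iff (s : String) :
    (ctxTerms.any (fun term => PySem.Str.isIn term s)) = true ↔
      ∃ t ∈ ctxTermsB, t <:+: s.toList := by
  have hmap : ctxTermsB = ctxTerms.map String.toList := by decide
  rw [List.any_eq_true, hmap]
  simp only [List.mem_map]
  constructor
  · rintro ⟨u, hu, h⟩
    exact ⟨u.toList, ⟨u, hu, rfl⟩, (PySem.Str.isIn_iff_infix u s).1 h⟩
  · rintro ⟨t, ⟨u, hu, rfl⟩, h⟩
    exact ⟨u, hu, (PySem.Str.isIn_iff_infix u s).2 h⟩

-- ===== VERDICT (by name: the statement is the Claim_ definition above) =====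
theorem is_contextual_request_py_spec : Claim_equal_is_contextual_request_py := by
  intro keywords _
  unfold Spec_is_contextual_request_py
  unfold is_contextual_request_py is_contextual_request_py_alt
  split_ifs with h
  · rfl
  · rw [Bool.eq_iff_iff, ctxAny_iff, ctxScan_iff]
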